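-- pv_equiv track=rewrite | github.com/insub4067/CodingTest | 프로그래머스/레벨2/귤 고르기.py | solution
-- ===== SOURCE A (Python) =====
-- from collections import defaultdict
--
-- def solution(k, tangerine):
--     dict = defaultdict(int)
--     for t in tangerine:
--         dict[t] += 1
--     counts = sorted(dict.values(), reverse=True)
--
--     answer = 0
--     total = 0
--
--     for c in counts:
--         total += c
--         answer += 1
--         if total >= k:
--             return answer
-- ===== SOURCE B (Python) =====
-- from collections import Counter
--
-- def solution(k, tangerine):
--     cnt = Counter(tangerine)
--     if not cnt:
--         return None
--     maxc = max(cnt.values())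
--     freq = [0] * (maxc + 1)
--     for c in cnt.values():
--         freq[c] += 1
--     total = 0
--     answer = 0
--     for c in range(maxc, 0, -1):
--         for _ in range(freq[c]):
--             total += c
--             answer += 1
--             if total >= k:
--                 return answer
--     return None
-- ===== Notes on version B (the rewrite author's own statement) =====
-- stated objective: alternative
-- what changed: replaces sorting the frequency values with a counting-sort style histogram (freq[c] = number of kinds with count c) traversed from the largest count downward
-- outside the precondition, e.g. on solution(5, []): A returns None, B returns None; on solution(4, [1, 1, 2]): A returns None, B returns None
import Mathlib
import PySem

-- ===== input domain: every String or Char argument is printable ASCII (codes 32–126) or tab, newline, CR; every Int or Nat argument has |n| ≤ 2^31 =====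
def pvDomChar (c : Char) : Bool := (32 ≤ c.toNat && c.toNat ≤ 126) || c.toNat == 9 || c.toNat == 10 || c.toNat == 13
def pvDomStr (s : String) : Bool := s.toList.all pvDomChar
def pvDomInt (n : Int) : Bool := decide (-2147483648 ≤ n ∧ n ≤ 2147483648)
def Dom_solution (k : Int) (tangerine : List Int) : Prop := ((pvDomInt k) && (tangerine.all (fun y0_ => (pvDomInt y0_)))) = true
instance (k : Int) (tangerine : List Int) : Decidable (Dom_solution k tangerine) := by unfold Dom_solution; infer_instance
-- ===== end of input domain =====

-- B replaces the sort of the count values by a histogram over counts scanned from the largest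
-- count down (counting-sort style); alternative algorithm, same greedy result.

-- ===== PORT A =====
-- the 'for c in counts: total += c; answer += 1; if total >= k: return answer' loop;
-- the fall-through ('return None', not an Int) is outside Pre_ and ported as 0
def solLoop (k : Int) : List Int → Int → Int → Int
  | [], _answer, _total => 0
  | c :: counts, answer, total =>
    let total := total + c
    let answer := answer + 1
    if total ≥ k then answer else solLoop k counts answer total

def solution (k : Int) (tangerine : List Int) : Int :=
  let d := tangerine.foldl (fun d t => PySem.Dict.modify d t 0 (· + 1)) PySem.Dict.empty
  let counts := PySem.List.sorted d.values (fun x => x) true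
  solLoop k counts 0 0

-- ===== PORT B =====
-- inner 'for _ in range(n)' loop of Source B: Sum.inl = early return, Sum.inr = fall through with state
def bInner (k c : Int) : Nat → Int → Int → (Int ⊕ Int × Int)
  | 0, total, answer => Sum.inr (total, answer)
  | n + 1, total, answer =>
    let total := total + c
    let answer := answer + 1
    if total ≥ k then Sum.inl answer else bInner k c n total answer

-- outer 'for c in range(maxc, 0, -1)' loop of Source B; fall-through ('return None') ported as 0
def bOuter (k : Int) (freq : List Int) : Nat → Int → Int → Int
  | 0, _total, _answer => 0
  | c + 1, total, answer =>
    match bInner k ((c : Int) + 1) (freq.getD (c + 1) 0).toNat total answer with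
    | Sum.inl ans => ans
    | Sum.inr (total, answer) => bOuter k freq c total answer

def solution_alt (k : Int) (tangerine : List Int) : Int :=
  let cnt := PySem.Dict.counter tangerine
  if cnt.size = 0 then 0
  else
    let vals := cnt.values
    -- max(cnt.values()): nonempty in this branch, so getD 0 is never used
    let maxc := ((PySem.List.max? vals (fun x => x)).getD 0).toNat
    let freq := vals.foldl (fun f c => f.set c.toNat (f.getD c.toNat 0 + 1))
      (List.replicate (maxc + 1) 0)
    bOuter k freq maxc 0 0

-- ===== PRECONDITION & SPEC =====
-- Pre_ excludes exactly the inputs on which Python A falls off the loop and returns None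
-- (empty list, or k larger than the total number of tangerines): None is not an Int.
def Pre_solution (k : Int) (tangerine : List Int) : Prop :=
  tangerine ≠ [] ∧ k ≤ (tangerine.length : Int)
instance (k : Int) (tangerine : List Int) : Decidable (Pre_solution k tangerine) := by
  unfold Pre_solution; infer_instance

def pvWitness_solution : Int × List Int := (2, [1, 1, 2])

def Spec_solution (k : Int) (tangerine : List Int) (out : Int) : Prop := out = solution_alt k tangerine
instance (k : Int) (tangerine : List Int) (out : Int) : Decidable (Spec_solution k tangerine out) := by
  unfold Spec_solution; infer_instance

-- ===== CLAIM (what is proved, stated in full; the proofs are below) =====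
def Claim_equal_solution : Prop := ∀ (k : Int) (tangerine : List Int), Dom_solution k tangerine → Pre_solution k tangerine → Spec_solution k tangerine (solution k tangerine)

-- ===== LEMMAS AND PROOFS =====

-- the descending list of counts that B's two nested loops traverse
def descList (freq : List Int) : Nat → List Int
  | 0 => []
  | c + 1 => List.replicate (freq.getD (c + 1) 0).toNat ((c : Int) + 1) ++ descList freq c

theorem inner_eq (k c : Int) (rest : List Int) :
    ∀ (n : Nat) (total answer : Int),
      (match bInner k c n total answer with
        | Sum.inl a => a
        | Sum.inr (t, a) => solLoop k rest a t)
      = solLoop k (List.replicate n c ++ rest) answer total := by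
  intro n
  induction n with
  | zero => intro total answer; simp [bInner]
  | succ n ih =>
    intro total answer
    simp only [List.replicate_succ, List.cons_append, bInner, solLoop]
    by_cases h : total + c ≥ k
    · simp [h]
    · simp only [h, if_false]
      exact ih _ _

theorem outer_eq (k : Int) (freq : List Int) :
    ∀ (c : Nat) (total answer : Int),
      bOuter k freq c total answer = solLoop k (descList freq c) answer total := by
  intro c
  induction c with
  | zero => intro total answer; simp [bOuter, descList, solLoop]
  | succ c ih =>
    intro total answer
    rw [descList, ← inner_eq]
    simp only [bOuter]
    rcases h : bInner k ((c : Int) + 1) (freq.getD (c + 1) 0).toNat total answer with a | ⟨t, a⟩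
    · rfl
    · exact ih t a

theorem freq_getD (step : List Int → Int → List Int)
    (hstep : step = fun f c => f.set c.toNat (f.getD c.toNat 0 + 1)) :
    ∀ (vals f0 : List Int), (∀ v ∈ vals, 1 ≤ v ∧ v.toNat < f0.length) →
      ∀ (j : Nat), (vals.foldl step f0).getD j 0 = f0.getD j 0 + (vals.count (j : Int) : Int) := by
  intro vals
  subst hstep
  induction vals with
  | nil => intro f0 _ j; simp
  | cons v vals ih =>
    intro f0 hv j
    have hv1 : 1 ≤ v := (hv v (by simp)).1
    have hvlt : v.toNat < f0.length := (hv v (by simp)).2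
    simp only [List.foldl_cons]
    have hlen : (f0.set v.toNat (f0.getD v.toNat 0 + 1)).length = f0.length := by
      simp
    rw [ih (f0.set v.toNat (f0.getD v.toNat 0 + 1))
      (fun w hw => by rw [hlen]; exact hv w (by simp [hw])) j]
    by_cases hj : v.toNat = j
    · have hvj : v = (j : Int) := by omega
      subst hj
      rw [List.getD_eq_getElem?_getD, List.getElem?_set_self hvlt, List.count_cons]
      simp only [Option.getD_some, ← hvj, beq_self_eq_true, if_true]
      push_cast
      ring
    · have hvj : v ≠ (j : Int) := by omega
      rw [List.getD_eq_getElem?_getD, List.getElem?_set_ne hj, List.count_cons]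
      simp [← List.getD_eq_getElem?_getD, hvj]

theorem count_descList (freq : List Int) :
    ∀ (c : Nat) (x : Int),
      ((descList freq c).count x : Int)
        = if 1 ≤ x ∧ x ≤ (c : Int) then (((freq.getD x.toNat 0).toNat : Nat) : Int) else 0 := by
  intro c
  induction c with
  | zero =>
    intro x
    rw [descList, if_neg (by omega)]
    simp
  | succ c ih =>
    intro x
    rw [descList, List.count_append, List.count_replicate]
    by_cases hx : x = (c : Int) + 1
    · have h0 := ih x
      rw [if_neg (by omega)] at h0
      have hz : (descList freq c).count x = 0 := by exact_mod_cast h0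
      have hb : (((c : Int) + 1) == x) = true := by simp [hx]
      have ht : x.toNat = c + 1 := by omega
      rw [hz, hb, if_pos rfl, if_pos (by push_cast; omega), ht]
      push_cast
      ring
    · have hb : (((c : Int) + 1) == x) = false := by simp [Ne.symm hx]
      rw [hb]
      simp only [Bool.false_eq_true, if_false, Nat.zero_add]
      rw [ih x]
      split_ifs <;> first | rfl | (exfalso; push_cast at *; omega)

theorem descList_bound_pairwise (freq : List Int) :
    ∀ (c : Nat), (∀ x ∈ descList freq c, 1 ≤ x ∧ x ≤ (c : Int)) ∧
      (descList freq c).Pairwise (fun a b => b ≤ a) := by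
  intro c
  induction c with
  | zero => simp [descList]
  | succ c ih =>
    constructor
    · intro x hx
      rw [descList, List.mem_append] at hx
      rcases hx with hx | hx
      · have := List.eq_of_mem_replicate hx; omega
      · have := ih.1 x hx; push_cast; omega
    · rw [descList, List.pairwise_append]
      refine ⟨List.pairwise_replicate.2 (by simp), ih.2, ?_⟩
      intro a ha b hb
      have h1 := List.eq_of_mem_replicate ha
      have h2 := (ih.1 b hb).2
      omega

theorem sorted_rev_id_eq (xs ys : List Int) (h : ys.Perm xs)
    (hp : ys.Pairwise (fun a b => b ≤ a)) :
    PySem.List.sorted xs (fun x => x) true = ys := by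
  have h1 : (PySem.List.sorted xs (fun x => x) true).Pairwise (fun a b => b ≤ a) :=
    PySem.List.sorted_pairwise_rev xs (fun x => x)
  have h2 : (PySem.List.sorted xs (fun x => x) true).Perm ys :=
    (PySem.List.sorted_perm xs (fun x => x) true).trans h.symm
  exact List.Perm.eq_of_pairwise (fun a b _ _ hab hba => le_antisymm hba hab) h1 hp h2

-- every value of Counter(tangerine) is the count of a member, hence ≥ 1
theorem vals_pos (tangerine : List Int) :
    ∀ v ∈ (PySem.Dict.counter tangerine).values, 1 ≤ v := by
  intro v hv
  have : (PySem.Dict.counter tangerine).values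
      = (PySem.Set.ofList tangerine).map (fun k => ((tangerine.count k : Nat) : Int)) := by
    show (PySem.Dict.counter tangerine).items.map (·.2) = _
    rw [PySem.Dict.items_counter]
    simp
  rw [this, List.mem_map] at hv
  obtain ⟨key, hkey, rfl⟩ := hv
  have hk : key ∈ tangerine := (PySem.Set.mem_ofList tangerine key).1 hkey
  have := List.count_pos_iff.2 hk
  omega

theorem solution_eq_solLoop_descList (k : Int) (tangerine : List Int)
    (hnil : tangerine ≠ []) : solution k tangerine = solution_alt k tangerine := by
  -- names for the pieces shared by the two ports
  set cnt := PySem.Dict.counter tangerine with hcnt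
  set vals := cnt.values with hvals
  have hpos : ∀ v ∈ vals, 1 ≤ v := vals_pos tangerine
  -- vals is nonempty
  have hvne : vals ≠ [] := by
    intro hemp
    rcases List.exists_mem_of_ne_nil tangerine hnil with ⟨t, ht⟩
    have hmem : (t, ((tangerine.count t : Nat) : Int)) ∈ cnt.items := by
      rw [hcnt, PySem.Dict.items_counter, List.mem_map]
      exact ⟨t, (PySem.Set.mem_ofList tangerine t).2 ht, rfl⟩
    have : ((tangerine.count t : Nat) : Int) ∈ vals := by
      rw [hvals]
      exact List.mem_map_of_mem hmem
    rw [hemp] at this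
    exact absurd this (List.not_mem_nil)
  -- the maximum count m
  rcases hm : PySem.List.max? vals (fun x => x) with _ | m
  · exact absurd ((PySem.List.max?_eq_none_iff vals (fun x => x)).1 hm) hvne
  have hm1 : 1 ≤ m := hpos m (PySem.List.max?_mem hm)
  have hmax : ∀ v ∈ vals, v ≤ m := fun v hv => PySem.List.max?_isMax hm v hv
  have hmnat : ((m.toNat : Nat) : Int) = m := by omega
  -- the histogram
  set freq := vals.foldl (fun f c => f.set c.toNat (f.getD c.toNat 0 + 1))
      (List.replicate (m.toNat + 1) (0 : Int)) with hfreqdef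
  have hfreq : ∀ j : Nat, freq.getD j 0 = ((vals.count (j : Int) : Nat) : Int) := by
    intro j
    rw [hfreqdef, freq_getD _ rfl vals _
      (fun v hv => ⟨hpos v hv, by simp; have := hmax v hv; have := hpos v hv; omega⟩) j]
    by_cases hj : j < m.toNat + 1
    · rw [List.getD_replicate _ hj]; ring
    · have h1 : (List.replicate (m.toNat + 1) (0 : Int)).getD j 0 = 0 := by
        rw [List.getD_eq_getElem?_getD, List.getElem?_eq_none (by simp; omega)]
        rfl
      have h2 : vals.count ((j : Nat) : Int) = 0 := by
        rw [List.count_eq_zero]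
        intro hmem
        have := hmax _ hmem
        omega
      rw [h1, h2]
      ring
  -- the sorted count list of A is exactly the descending bucket list of B
  have hkey : PySem.List.sorted vals (fun x => x) true = descList freq m.toNat := by
    apply sorted_rev_id_eq
    · rw [List.perm_iff_count]
      intro x
      by_cases hx : 1 ≤ x ∧ x ≤ m
      · have h1 := count_descList freq m.toNat x
        rw [if_pos (by omega)] at h1
        have h2 := hfreq x.toNat
        have hxx : ((x.toNat : Nat) : Int) = x := by omega
        rw [hxx] at h2
        rw [h2] at h1
        omega
      · have h1 := count_descList freq m.toNat x
        rw [if_neg (by omega)] at h1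
        have h2 : (descList freq m.toNat).count x = 0 := by exact_mod_cast h1
        have h3 : vals.count x = 0 := by
          rw [List.count_eq_zero]
          intro hmem
          have := hmax x hmem
          have := hpos x hmem
          omega
        rw [h2, h3]
    · exact (descList_bound_pairwise freq m.toNat).2
  -- size of cnt is nonzero
  have hsz : ¬ cnt.size = 0 := by
    have hitems : cnt.items ≠ [] := by
      intro h
      apply hvne
      rw [hvals]
      show cnt.items.map (·.2) = []
      rw [h]
      rfl
    simp only [PySem.Dict.size]
    simpa using hitems
  -- assemble
  show solLoop k (PySem.List.sorted cnt.values (fun x => x) true) 0 0 = _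
  rw [solution_alt, if_neg hsz]
  show solLoop k (PySem.List.sorted vals (fun x => x) true) 0 0
    = bOuter k (vals.foldl (fun f c => f.set c.toNat (f.getD c.toNat 0 + 1))
        (List.replicate ((((PySem.List.max? vals (fun x => x)).getD 0).toNat) + 1) (0 : Int)))
      (((PySem.List.max? vals (fun x => x)).getD 0).toNat) 0 0
  rw [hm, Option.getD_some, ← hfreqdef, hkey, outer_eq]

-- ===== VERDICT (by name: the statement is the Claim_ definition above) =====
theorem solution_spec : Claim_equal_solution := by
  intro k tangerine _hdom hpre
  exact solution_eq_solLoop_descList k tangerine hpre.1
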